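-- pv_equiv track=rewrite | github.com/chenkewei99/2017A2CS | Ch25/recursion 1.py | array11
-- ===== SOURCE A (Python) =====
-- def array11(nums, index):
--     if index == len(nums)-1 and nums[index]==11:
--         return 1
--     if index == len(nums)-1 and nums[index]!=11:
--         return 0
--     if nums[index] == 11:
--         return 1 + array11(nums,index+1)
--     else:
--         return array11(nums, index+1)
-- ===== SOURCE B (Python) =====
-- def array11(nums, index):
--     count = 0
--     while index != len(nums) - 1:
--         if nums[index] == 11:
--             count += 1
--         index += 1
--     if nums[index] == 11:
--         count += 1
--     return count
-- ===== Notes on version B (the rewrite author's own statement) =====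
-- stated objective: faster
-- what changed: Replaces the recursion with an iterative while-loop and a count accumulator, removing the per-element Python function-call overhead (and the recursion-depth limit on long lists) while keeping the same element-access pattern.
import Mathlib
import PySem

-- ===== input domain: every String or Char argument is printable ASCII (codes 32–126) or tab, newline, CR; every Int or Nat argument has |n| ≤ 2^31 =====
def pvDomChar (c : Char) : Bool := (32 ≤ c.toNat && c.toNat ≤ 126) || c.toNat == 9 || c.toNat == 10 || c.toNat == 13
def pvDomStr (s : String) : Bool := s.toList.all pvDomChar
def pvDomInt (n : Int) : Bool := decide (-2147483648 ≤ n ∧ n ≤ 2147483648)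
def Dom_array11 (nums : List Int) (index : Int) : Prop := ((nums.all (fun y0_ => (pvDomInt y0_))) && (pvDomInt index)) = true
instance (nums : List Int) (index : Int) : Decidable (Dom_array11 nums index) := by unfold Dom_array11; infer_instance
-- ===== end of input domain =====

-- B replaces the recursion by an iterative while-loop with a count accumulator (same result, same
-- IndexError pattern, replacing per-element recursive calls by one loop).

-- ===== PORT A =====
-- Python accesses nums[index] on every path (short-circuit `and`), so the port reads it first;
-- `none` is Python's IndexError (excluded by Pre_; the port returns 0 there, nothing is claimed).
def array11 (nums : List Int) (index : Int) : Int :=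
  match h : PySem.List.pyGet? nums index with
  | none => 0
  | some v =>
    if index = (nums.length : Int) - 1 then
      (if v = 11 then 1 else 0)
    else if v = 11 then 1 + array11 nums (index + 1)
    else array11 nums (index + 1)
termination_by ((nums.length : Int) - index).toNat
decreasing_by
  all_goals
  · have hr : ¬ PySem.List.pyGet? nums index = none := by simp [h]
    rw [PySem.List.pyGet?_eq_none_iff] at hr
    have : -(nums.length : Int) ≤ index ∧ index < nums.length := by
      simpa [PySem.Raise.InRange] using not_not.mp hr
    omega

-- ===== PORT B =====
-- the while-loop: first the loop test `index != len(nums)-1`, then the body's nums[index] access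
-- (`none` = IndexError, excluded by Pre_); after the loop, one final access of nums[index].
def array11AltLoop (nums : List Int) (index : Int) (count : Int) : Int :=
  if index = (nums.length : Int) - 1 then
    match PySem.List.pyGet? nums index with
    | none => count
    | some v => if v = 11 then count + 1 else count
  else
    match h : PySem.List.pyGet? nums index with
    | none => count
    | some v => array11AltLoop nums (index + 1) (if v = 11 then count + 1 else count)
termination_by ((nums.length : Int) - index).toNat
decreasing_by
  all_goals
  · have hr : ¬ PySem.List.pyGet? nums index = none := by simp [h]
    rw [PySem.List.pyGet?_eq_none_iff] at hr
    have : -(nums.length : Int) ≤ index ∧ index < nums.length := by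
      simpa [PySem.Raise.InRange] using not_not.mp hr
    omega

def array11_alt (nums : List Int) (index : Int) : Int :=
  array11AltLoop nums index 0

-- ===== PRECONDITION & SPEC =====
-- Pre_: exactly the inputs on which the Python A returns (any out-of-range index, including every
-- index on the empty list, is an IndexError in both A and B).
def Pre_array11 (nums : List Int) (index : Int) : Prop :=
  -(nums.length : Int) ≤ index ∧ index < (nums.length : Int)
instance (nums : List Int) (index : Int) : Decidable (Pre_array11 nums index) := by unfold Pre_array11; infer_instance
def pvWitness_array11 : List Int × Int := ([11, 2, 11], 1)

def Spec_array11 (nums : List Int) (index : Int) (out : Int) : Prop := out = array11_alt nums index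
instance (nums : List Int) (index : Int) (out : Int) : Decidable (Spec_array11 nums index out) := by unfold Spec_array11; infer_instance

-- ===== CLAIM (what is proved, stated in full; the proofs are below) =====
def Claim_equal_array11 : Prop := ∀ (nums : List Int) (index : Int), Dom_array11 nums index → Pre_array11 nums index → Spec_array11 nums index (array11 nums index)

-- ===== LEMMAS AND PROOFS =====

-- Loop invariant: on an in-range index the accumulator passes through — the loop returns
-- `count` plus whatever the recursion A computes from the same position.
lemma altLoop_eq (nums : List Int) (index : Int) (count : Int)
    (h1 : -(nums.length : Int) ≤ index) (h2 : index < (nums.length : Int)) :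
    array11AltLoop nums index count = count + array11 nums index := by
  have hg : ¬ PySem.List.pyGet? nums index = none := by
    rw [PySem.List.pyGet?_eq_none_iff]
    simp [PySem.Raise.InRange]; omega
  obtain ⟨v, hv⟩ := Option.ne_none_iff_exists'.mp hg
  rw [array11AltLoop, array11, hv]
  dsimp only
  by_cases hlast : index = (nums.length : Int) - 1
  · rw [if_pos hlast, if_pos hlast]
    by_cases h11 : v = 11 <;> simp [h11]
  · rw [if_neg hlast, if_neg hlast]
    have h2' : index + 1 < (nums.length : Int) := by omega
    have ih := altLoop_eq nums (index + 1) (if v = 11 then count + 1 else count) (by omega) h2'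
    rw [ih]
    by_cases h11 : v = 11
    · simp [h11]; ring
    · simp [h11]
termination_by ((nums.length : Int) - index).toNat
decreasing_by omega

-- ===== VERDICT (by name: the statement is the Claim_ definition above) =====
theorem array11_spec : Claim_equal_array11 := by
  intro nums index _ hpre
  obtain ⟨h1, h2⟩ := hpre
  unfold Spec_array11 array11_alt
  rw [altLoop_eq nums index 0 h1 h2, zero_add]
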